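-- pv_equiv track=rewrite | github.com/ParkKunSik/content-ai-agent | viewer/viewer/streamlit/renderer.py | _render_insights_section
-- ===== SOURCE A (Python) =====
-- from typing import List, Optional
--
-- def _render_insights_section(
--     good_points: List[str],
--     caution_points: List[str]
-- ) -> str:
--     """
--     Good Points와 Caution Points를 HTML로 렌더링
--     """
--     if not good_points and not caution_points:
--         return ""
--
--     html_parts = ['<div class="insights-section">']
--
--     if good_points:
--         html_parts.append('<div class="good-points">')
--         html_parts.append('<h4 class="insights-title good">좋은 점</h4>')
--         html_parts.append('<ul>')
--         for point in good_points:
--             html_parts.append(f'<li>{point}</li>')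
--         html_parts.append('</ul>')
--         html_parts.append('</div>')
--
--     if caution_points:
--         html_parts.append('<div class="caution-points">')
--         html_parts.append('<h4 class="insights-title caution">참고 사항</h4>')
--         html_parts.append('<ul>')
--         for point in caution_points:
--             html_parts.append(f'<li>{point}</li>')
--         html_parts.append('</ul>')
--         html_parts.append('</div>')
--
--     html_parts.append('</div>')
--     return '\n'.join(html_parts)
-- ===== SOURCE B (Python) =====
-- from typing import List
--
-- def _emit(node):
--     """Recursively serialize a tiny HTML node tree into a list of lines."""
--     tag = node[0]
--     if tag == "div":
--         _, cls, children = node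
--         lines = [f'<div class="{cls}">']
--         for child in children:
--             lines.extend(_emit(child))
--         lines.append('</div>')
--         return lines
--     if tag == "h4":
--         _, cls, text = node
--         return [f'<h4 class="{cls}">{text}</h4>']
--     # tag == "ul"
--     return ['<ul>'] + [f'<li>{item}</li>' for item in node[1]] + ['</ul>']
--
-- def _render_insights_section(
--     good_points: List[str],
--     caution_points: List[str]
-- ) -> str:
--     sections = []
--     if good_points:
--         sections.append(("div", "good-points",
--                          [("h4", "insights-title good", "좋은 점"), ("ul", good_points)]))
--     if caution_points:
--         sections.append(("div", "caution-points",
--                          [("h4", "insights-title caution", "참고 사항"), ("ul", caution_points)]))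
--     if not sections:
--         return ""
--     return "\n".join(_emit(("div", "insights-section", sections)))
-- ===== Notes on version B (the rewrite author's own statement) =====
-- stated objective: alternative
-- what changed: A appends lines one-by-one to a flat html_parts list inside two unrolled if-blocks; B first builds a small HTML node tree (div/h4/ul nodes) and then serializes it with a recursive emitter into lines joined by '\n' — a two-stage build-AST-then-render decomposition.
import Mathlib
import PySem

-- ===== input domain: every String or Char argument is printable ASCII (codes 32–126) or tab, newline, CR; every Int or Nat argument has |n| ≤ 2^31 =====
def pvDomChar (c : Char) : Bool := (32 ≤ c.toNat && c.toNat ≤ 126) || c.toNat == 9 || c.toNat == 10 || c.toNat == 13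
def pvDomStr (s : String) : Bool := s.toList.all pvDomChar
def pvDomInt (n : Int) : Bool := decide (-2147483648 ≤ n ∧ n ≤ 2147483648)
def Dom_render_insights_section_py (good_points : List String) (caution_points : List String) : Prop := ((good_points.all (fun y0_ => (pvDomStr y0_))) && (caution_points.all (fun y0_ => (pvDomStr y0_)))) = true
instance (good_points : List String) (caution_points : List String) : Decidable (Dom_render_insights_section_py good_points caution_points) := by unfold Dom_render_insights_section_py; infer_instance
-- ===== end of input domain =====

-- B builds a small HTML node tree and serializes it with a recursive emitter,
-- instead of A's flat line-by-line append into html_parts (objective: alternative decomposition).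

-- ===== PORT A =====
def render_insights_section_py (good_points : List String) (caution_points : List String) : String :=
  if good_points = [] ∧ caution_points = [] then ""
  else
    let html_parts : List String := ["<div class=\"insights-section\">"]
    let html_parts :=
      if good_points ≠ [] then
        (good_points.foldl (fun acc point => acc ++ ["<li>" ++ point ++ "</li>"])
          (html_parts ++ ["<div class=\"good-points\">",
                          "<h4 class=\"insights-title good\">좋은 점</h4>", "<ul>"]))
          ++ ["</ul>", "</div>"]
      else html_parts
    let html_parts :=
      if caution_points ≠ [] then
        (caution_points.foldl (fun acc point => acc ++ ["<li>" ++ point ++ "</li>"])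
          (html_parts ++ ["<div class=\"caution-points\">",
                          "<h4 class=\"insights-title caution\">참고 사항</h4>", "<ul>"]))
          ++ ["</ul>", "</div>"]
      else html_parts
    PySem.Str.join "\n" (html_parts ++ ["</div>"])

-- ===== PORT B =====
-- tiny HTML AST (mutual pair instead of a nested inductive)
mutual
inductive PvNode : Type
  | div : String → PvNodes → PvNode
  | h4 : String → String → PvNode
  | ul : List String → PvNode
inductive PvNodes : Type
  | nil : PvNodes
  | cons : PvNode → PvNodes → PvNodes
end

-- recursive serializer (Python's _emit)
mutual
def pvEmit : PvNode → List String
  | .div cls children =>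
      ("<div class=\"" ++ cls ++ "\">") :: (pvEmitList children ++ ["</div>"])
  | .h4 cls text => ["<h4 class=\"" ++ cls ++ "\">" ++ text ++ "</h4>"]
  | .ul items => "<ul>" :: (items.map (fun item => "<li>" ++ item ++ "</li>") ++ ["</ul>"])
def pvEmitList : PvNodes → List String
  | .nil => []
  | .cons n ns => pvEmit n ++ pvEmitList ns
end

def render_insights_section_py_alt (good_points : List String) (caution_points : List String) : String :=
  let sections : PvNodes :=
    (if good_points ≠ [] then
        PvNodes.cons (.div "good-points"
          (.cons (.h4 "insights-title good" "좋은 점") (.cons (.ul good_points) .nil)))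
      else id)
    ((if caution_points ≠ [] then
        PvNodes.cons (.div "caution-points"
          (.cons (.h4 "insights-title caution" "참고 사항") (.cons (.ul caution_points) .nil)))
      else id) .nil)
  match sections with
  | .nil => ""
  | _ => PySem.Str.join "\n" (pvEmit (.div "insights-section" sections))

-- ===== PRECONDITION & SPEC =====
def Spec_render_insights_section_py (good_points : List String) (caution_points : List String) (out : String) : Prop := out = render_insights_section_py_alt good_points caution_points
instance (good_points : List String) (caution_points : List String) (out : String) : Decidable (Spec_render_insights_section_py good_points caution_points out) := by unfold Spec_render_insights_section_py; infer_instance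

-- ===== CLAIM (what is proved, stated in full; the proofs are below) =====
def Claim_equal_render_insights_section_py : Prop := ∀ (good_points : List String) (caution_points : List String), Dom_render_insights_section_py good_points caution_points → Spec_render_insights_section_py good_points caution_points (render_insights_section_py good_points caution_points)

-- ===== LEMMAS AND PROOFS =====

theorem pv_flatten_map_singleton {α β : Type} (f : α → β) (l : List α) :
    (l.map (fun x => [f x])).flatten = l.map f := by
  induction l with
  | nil => rfl
  | cons a l ih => simp [ih]

-- ===== VERDICT (by name: the statement is the Claim_ definition above) =====
set_option maxRecDepth 8000 in
theorem render_insights_section_py_spec : Claim_equal_render_insights_section_py := by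
  intro g c _
  unfold Spec_render_insights_section_py render_insights_section_py render_insights_section_py_alt
  by_cases hg : g = [] <;> by_cases hc : c = [] <;>
    simp [hg, hc, pvEmit, pvEmitList, pv_flatten_map_singleton,
      List.append_assoc]
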